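-- pv_equiv track=rewrite | github.com/GuillaumeBld/Ev0 | backend/app/services/recommendation_service.py | _find_player_stats
-- ===== SOURCE A (Python) =====
-- from typing import Any
--
-- def _find_player_stats(
--     player_name: str,
--     stats_dict: dict[str, dict],
-- ) -> dict[str, Any] | None:
--     """Find player stats by name (fuzzy matching)."""
--     # Direct match
--     if player_name in stats_dict:
--         return stats_dict[player_name]
--
--     # Normalized match
--     normalized = player_name.lower().replace(" ", "-")
--     for key, stats in stats_dict.items():
--         if key.lower().replace(" ", "-") == normalized:
--             return stats
--
--     # Partial match (last name)
--     parts = player_name.split()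
--     if parts:
--         last_name = parts[-1].lower()
--         for key, stats in stats_dict.items():
--             if last_name in key.lower():
--                 return stats
--
--     return None
-- ===== SOURCE B (Python) =====
-- def _find_player_stats(player_name, stats_dict):
--     """Find player stats by name (fuzzy matching): one pass, three candidates."""
--     normalized = player_name.lower().replace(" ", "-")
--     parts = player_name.split()
--     last_name = parts[-1].lower() if parts else None
--     direct = norm = partial = None
--     direct_f = norm_f = partial_f = False
--     for key, stats in stats_dict.items():
--         if not direct_f and key == player_name:
--             direct, direct_f = stats, True
--         if not norm_f and key.lower().replace(" ", "-") == normalized: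
--             norm, norm_f = stats, True
--         if not partial_f and last_name is not None and last_name in key.lower():
--             partial, partial_f = stats, True
--     if direct_f:
--         return direct
--     if norm_f:
--         return norm
--     if partial_f:
--         return partial
--     return None
-- ===== Notes on version B (the rewrite author's own statement) =====
-- stated objective: alternative
-- what changed: Replaces A's three sequential scans (membership+lookup, normalized loop, last-name loop) by a single pass over the items that records the first direct, first normalized and first partial candidate with found-flags and picks by priority afterwards.
import Mathlib
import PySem

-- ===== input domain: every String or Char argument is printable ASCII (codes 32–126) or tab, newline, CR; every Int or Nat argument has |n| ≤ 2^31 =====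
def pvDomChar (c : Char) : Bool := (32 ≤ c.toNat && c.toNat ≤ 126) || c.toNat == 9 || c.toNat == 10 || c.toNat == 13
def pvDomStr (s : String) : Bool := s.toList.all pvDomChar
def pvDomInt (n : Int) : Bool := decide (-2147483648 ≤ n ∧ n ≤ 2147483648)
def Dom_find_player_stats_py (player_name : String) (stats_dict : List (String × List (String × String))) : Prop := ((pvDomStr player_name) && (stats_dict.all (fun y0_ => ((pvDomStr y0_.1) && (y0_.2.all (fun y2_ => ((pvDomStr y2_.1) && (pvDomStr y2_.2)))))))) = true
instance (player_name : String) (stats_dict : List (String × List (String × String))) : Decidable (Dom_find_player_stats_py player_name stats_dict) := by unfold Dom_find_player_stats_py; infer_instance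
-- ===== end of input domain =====

-- B does one pass recording first direct/normalized/partial candidates with found-flags,
-- instead of A's three sequential scans; same cost, different decomposition.

-- ===== PORT A =====
-- key.lower().replace(" ", "-")
def pvNorm (s : String) : String := PySem.Str.replace (PySem.Str.lower s) " " "-"

def find_player_stats_py (player_name : String) (stats_dict : List (String × List (String × String))) : Option (List (String × String)) :=
  -- Direct match: 'player_name in stats_dict' then 'stats_dict[player_name]' (first match)
  match stats_dict.find? (fun kv => kv.1 == player_name) with
  | some kv => some kv.2
  | none =>
    -- Normalized match
    let normalized := pvNorm player_name
    match stats_dict.find? (fun kv => pvNorm kv.1 == normalized) with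
    | some kv => some kv.2
    | none =>
      -- Partial match (last name): parts = player_name.split(); parts[-1]
      let parts := PySem.Str.split₀ player_name
      match PySem.List.pyGet? parts (-1) with
      | some lastp =>
        let last_name := PySem.Str.lower lastp
        match stats_dict.find? (fun kv => PySem.Str.isIn last_name (PySem.Str.lower kv.1)) with
        | some kv => some kv.2
        | none => none
      | none => none

-- ===== PORT B =====
-- one fold step: fill each of the three candidate slots on its first hit
def pvStep (player_name normalized : String) (lastOpt : Option String)
    (acc : Option (List (String × String)) × Option (List (String × String)) × Option (List (String × String)))
    (kv : String × List (String × String)) :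
    Option (List (String × String)) × Option (List (String × String)) × Option (List (String × String)) :=
  let d := if acc.1.isSome then acc.1 else if kv.1 == player_name then some kv.2 else none
  let n := if acc.2.1.isSome then acc.2.1 else if pvNorm kv.1 == normalized then some kv.2 else none
  let p := if acc.2.2.isSome then acc.2.2 else
    match lastOpt with
    | some ln => if PySem.Str.isIn ln (PySem.Str.lower kv.1) then some kv.2 else none
    | none => none
  (d, n, p)

def find_player_stats_py_alt (player_name : String) (stats_dict : List (String × List (String × String))) : Option (List (String × String)) :=
  let normalized := pvNorm player_name
  let lastOpt := (PySem.List.pyGet? (PySem.Str.split₀ player_name) (-1)).map PySem.Str.lower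
  let r := stats_dict.foldl (pvStep player_name normalized lastOpt) (none, none, none)
  r.1.orElse (fun _ => r.2.1.orElse (fun _ => r.2.2))

-- ===== PRECONDITION & SPEC =====
def Spec_find_player_stats_py (player_name : String) (stats_dict : List (String × List (String × String))) (out : Option (List (String × String))) : Prop := out = find_player_stats_py_alt player_name stats_dict
instance (player_name : String) (stats_dict : List (String × List (String × String))) (out : Option (List (String × String))) : Decidable (Spec_find_player_stats_py player_name stats_dict out) := by unfold Spec_find_player_stats_py; infer_instance

-- ===== CLAIM (what is proved, stated in full; the proofs are below) =====
def Claim_equal_find_player_stats_py : Prop := ∀ (player_name : String) (stats_dict : List (String × List (String × String))), Dom_find_player_stats_py player_name stats_dict → Spec_find_player_stats_py player_name stats_dict (find_player_stats_py player_name stats_dict)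


-- ===== LEMMAS AND PROOFS =====

-- slot update of one candidate: keep an earlier hit, else take this element's hit
theorem pvSlot {R : Type} (o : Option R) (w : R) (q : Bool) (rest_find : Option R) :
    (if o.isSome then o else if q then some w else none).orElse (fun _ => rest_find) =
    o.orElse (fun _ => if q then some w else rest_find) := by
  cases o <;> cases q <;> simp [Option.orElse]

theorem pvFindMapCons {A R : Type} (p : A → Bool) (g : A → R) (a : A) (l : List A) :
    (List.find? p (a :: l)).map g = if p a then some (g a) else (List.find? p l).map g := by
  cases h : p a <;> simp [h]

-- the fold fills each slot, independently, with the FIRST hit of its predicate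
theorem pvStep_foldl (player_name normalized : String) (lastOpt : Option String)
    (sd : List (String × List (String × String)))
    (acc : Option (List (String × String)) × Option (List (String × String)) × Option (List (String × String))) :
    sd.foldl (pvStep player_name normalized lastOpt) acc =
      (acc.1.orElse (fun _ => (sd.find? (fun kv => kv.1 == player_name)).map (·.2)),
       acc.2.1.orElse (fun _ => (sd.find? (fun kv => pvNorm kv.1 == normalized)).map (·.2)),
       acc.2.2.orElse (fun _ =>
         match lastOpt with
         | some ln => (sd.find? (fun kv => PySem.Str.isIn ln (PySem.Str.lower kv.1))).map (·.2)
         | none => none)) := by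
  induction sd generalizing acc with
  | nil =>
    obtain ⟨d, n, p⟩ := acc
    cases d <;> cases n <;> cases p <;> cases lastOpt <;> simp [Option.orElse]
  | cons kv rest ih =>
    rw [List.foldl_cons, ih]
    obtain ⟨d, n, p⟩ := acc
    cases lastOpt with
    | none =>
      refine Prod.ext ?_ (Prod.ext ?_ ?_)
      · simp only [pvStep, pvFindMapCons, pvSlot]
      · simp only [pvStep, pvFindMapCons, pvSlot]
      · simp only [pvStep]
        cases p <;> simp [Option.orElse]
    | some ln =>
      refine Prod.ext ?_ (Prod.ext ?_ ?_) <;>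
        simp only [pvStep, pvFindMapCons, pvSlot]

-- ===== VERDICT (by name: the statement is the Claim_ definition above) =====
theorem find_player_stats_py_spec : Claim_equal_find_player_stats_py := by
  intro player_name stats_dict _
  unfold Spec_find_player_stats_py find_player_stats_py find_player_stats_py_alt
  simp only [pvStep_foldl]
  rcases hd : stats_dict.find? (fun kv => kv.1 == player_name) with _ | kv
  · rcases hn : stats_dict.find? (fun kv => pvNorm kv.1 == pvNorm player_name) with _ | kv'
    · rcases hl : PySem.List.pyGet? (PySem.Str.split₀ player_name) (-1) with _ | lastp
      · simp [hd, hn, Option.orElse]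
      · cases hp : stats_dict.find? (fun kv => PySem.Chars.isIn (PySem.Chars.lower lastp.toList) (PySem.Chars.lower kv.1.toList)) <;>
          simp [hd, hn, hp, Option.orElse]
    · simp [hd, hn, Option.orElse]
  · simp [hd, Option.orElse]
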